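-- pv_equiv track=rewrite | github.com/jaqcquesndav/Wanzo_Backend | apps/Adha-ai-service/agents/utils/knowledge_retrieval.py | _extract_relevant_sections
-- ===== SOURCE A (Python) =====
-- from typing import List, Dict, Any, Optional
--
-- def _extract_relevant_sections(content: str, query: str) -> List[str]:
--     """
--     Extrait les sections pertinentes du contenu selon la requête
--     """
--     lines = content.split('\n')
--     relevant_sections = []
--     current_section = []
--
--     query_terms = query.lower().split()
--     in_relevant_section = False
--
--     for line in lines:
--         # Nouvelle section (headers markdown)
--         if line.startswith('#'):
--             # Sauvegarder section précédente si pertinente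
--             if in_relevant_section and current_section:
--                 relevant_sections.append('\n'.join(current_section))
--
--             # Vérifier si nouvelle section est pertinente
--             current_section = [line]
--             in_relevant_section = any(term in line.lower() for term in query_terms)
--
--         else:
--             current_section.append(line)
--             # Vérifier pertinence dans le contenu
--             if not in_relevant_section and any(term in line.lower() for term in query_terms):
--                 in_relevant_section = True
--
--     # Ajouter dernière section si pertinente
--     if in_relevant_section and current_section:
--         relevant_sections.append('\n'.join(current_section))
--
--     # Si rien trouvé, retourner les premières sections importantes
--     if not relevant_sections:
--         relevant_sections = ['\n'.join(lines[:100])]  # Premiers 100 lignes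
--
--     return relevant_sections
-- ===== SOURCE B (Python) =====
-- def _extract_relevant_sections(content: str, query: str):
--     lines = content.split('\n')
--     terms = query.lower().split()
--
--     # Pass 1: group lines into section blocks (a new block starts at each '#' header).
--     blocks = []
--     cur = []
--     for line in lines:
--         if line.startswith('#'):
--             blocks.append(cur)
--             cur = [line]
--         else:
--             cur.append(line)
--     blocks.append(cur)
--
--     # Pass 2: keep blocks in which any line contains any query term.
--     relevant = ['\n'.join(b) for b in blocks
--                 if any(t in l.lower() for l in b for t in terms)]
--     return relevant or ['\n'.join(lines[:100])]
-- ===== Notes on version B (the rewrite author's own statement) =====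
-- stated objective: alternative
-- what changed: B replaces A's single stateful scan (current-section buffer plus an in_relevant_section flag updated line by line) by two passes: first group the lines into section blocks at '#' headers, then filter the blocks by whether any of their lines contains a query term, keeping the same 100-line fallback.
import Mathlib
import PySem

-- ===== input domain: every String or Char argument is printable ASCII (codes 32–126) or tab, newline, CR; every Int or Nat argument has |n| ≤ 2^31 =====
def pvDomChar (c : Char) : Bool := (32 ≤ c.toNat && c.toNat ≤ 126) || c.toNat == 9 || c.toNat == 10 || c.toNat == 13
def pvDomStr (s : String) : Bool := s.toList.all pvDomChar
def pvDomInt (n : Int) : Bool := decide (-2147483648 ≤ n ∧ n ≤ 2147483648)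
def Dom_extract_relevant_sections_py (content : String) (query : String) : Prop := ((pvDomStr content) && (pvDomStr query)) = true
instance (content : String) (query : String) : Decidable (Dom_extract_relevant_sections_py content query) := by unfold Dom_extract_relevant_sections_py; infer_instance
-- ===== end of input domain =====

-- B groups the lines into header-delimited blocks first and filters the blocks afterwards,
-- replacing A's single stateful scan; same cost, a plainer decomposition (objective: alternative).

-- ===== PORT A =====
-- stateful scan with state (relevant_sections, current_section, in_relevant_section);
-- content.split('\n') is Str.split? with the nonempty separator "\n", so .getD [] never fires.
def extract_relevant_sections_py (content : String) (query : String) : List String :=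
  let lines := (PySem.Str.split? content "\n").getD []
  let query_terms := PySem.Str.split₀ (PySem.Str.lower query)
  let st := lines.foldl
    (fun (s : List String × List String × Bool) line =>
      if PySem.Str.startswith line "#" then
        ((if s.2.2 && !s.2.1.isEmpty then s.1 ++ [PySem.Str.join "\n" s.2.1] else s.1),
         [line], query_terms.any (fun t => PySem.Str.isIn t (PySem.Str.lower line)))
      else
        (s.1, s.2.1 ++ [line],
          s.2.2 || query_terms.any (fun t => PySem.Str.isIn t (PySem.Str.lower line))))
    ([], [], false)
  let relevant := if st.2.2 && !st.2.1.isEmpty then st.1 ++ [PySem.Str.join "\n" st.2.1] else st.1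
  if relevant.isEmpty then [PySem.Str.join "\n" (PySem.List.slice lines none (some 100))]
  else relevant

-- ===== PORT B =====
def extract_relevant_sections_py_alt (content : String) (query : String) : List String :=
  let lines := (PySem.Str.split? content "\n").getD []
  let terms := PySem.Str.split₀ (PySem.Str.lower query)
  -- pass 1: group lines into section blocks
  let st := lines.foldl
    (fun (s : List (List String) × List String) line =>
      if PySem.Str.startswith line "#" then (s.1 ++ [s.2], [line])
      else (s.1, s.2 ++ [line]))
    ([], [])
  -- pass 2: keep the blocks in which some line contains some query term, join each with '\n'
  let relevant :=
    ((st.1 ++ [st.2]).filter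
      (fun b => b.any (fun l => terms.any (fun t => PySem.Str.isIn t (PySem.Str.lower l))))).map
      (PySem.Str.join "\n")
  if relevant.isEmpty then [PySem.Str.join "\n" (PySem.List.slice lines none (some 100))]
  else relevant

-- ===== PRECONDITION & SPEC =====
def Spec_extract_relevant_sections_py (content : String) (query : String) (out : List String) : Prop := out = extract_relevant_sections_py_alt content query
instance (content : String) (query : String) (out : List String) : Decidable (Spec_extract_relevant_sections_py content query out) := by unfold Spec_extract_relevant_sections_py; infer_instance

-- ===== CLAIM (what is proved, stated in full; the proofs are below) =====
def Claim_equal_extract_relevant_sections_py : Prop := ∀ (content : String) (query : String), Dom_extract_relevant_sections_py content query → Spec_extract_relevant_sections_py content query (extract_relevant_sections_py content query)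

-- ===== LEMMAS AND PROOFS =====

-- per-line / per-block relevance test (proof-side abbreviations)
def pvRel (terms : List String) (line : String) : Bool :=
  terms.any (fun t => PySem.Str.isIn t (PySem.Str.lower line))

def pvAnyRel (terms : List String) (b : List String) : Bool := b.any (pvRel terms)

-- A's post-loop flush of the pending section
def pvFinA (st : List String × List String × Bool) : List String :=
  if st.2.2 && !st.2.1.isEmpty then st.1 ++ [PySem.Str.join "\n" st.2.1] else st.1

-- B's post-loop filter-and-join of the blocks
def pvFinB (terms : List String) (st : List (List String) × List String) : List String :=
  ((st.1 ++ [st.2]).filter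
    (fun b => b.any (fun l => terms.any (fun t => PySem.Str.isIn t (PySem.Str.lower l))))).map
    (PySem.Str.join "\n")

-- flushing the pending section = filtering-and-joining that one block
theorem pv_flush_eq (terms : List String) (acc cur : List String) (accB : List (List String))
    (hacc : acc = (accB.filter (pvAnyRel terms)).map (PySem.Str.join "\n")) :
    (if pvAnyRel terms cur && !cur.isEmpty then acc ++ [PySem.Str.join "\n" cur] else acc)
      = ((accB ++ [cur]).filter (pvAnyRel terms)).map (PySem.Str.join "\n") := by
  subst hacc
  by_cases hc : cur = []
  · subst hc; simp [pvAnyRel]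
  · by_cases hr : pvAnyRel terms cur = true
    · simp [List.filter_append, hc, hr]
    · simp only [Bool.not_eq_true] at hr
      simp [List.filter_append, hr]

-- loop invariant: A's flag says "some line of the current section is relevant" and A's output
-- list is B's filtered-joined list of the blocks flushed so far; then both scans finish alike.
theorem pv_loop_eq (terms : List String) :
    ∀ (ls : List String) (acc cur : List String) (flag : Bool) (accB : List (List String)),
      flag = pvAnyRel terms cur →
      acc = (accB.filter (pvAnyRel terms)).map (PySem.Str.join "\n") →
      pvFinA (ls.foldl
        (fun (s : List String × List String × Bool) line =>
          if PySem.Str.startswith line "#" then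
            ((if s.2.2 && !s.2.1.isEmpty then s.1 ++ [PySem.Str.join "\n" s.2.1] else s.1),
             [line], terms.any (fun t => PySem.Str.isIn t (PySem.Str.lower line)))
          else
            (s.1, s.2.1 ++ [line],
              s.2.2 || terms.any (fun t => PySem.Str.isIn t (PySem.Str.lower line))))
        (acc, cur, flag))
      = pvFinB terms (ls.foldl
        (fun (s : List (List String) × List String) line =>
          if PySem.Str.startswith line "#" then (s.1 ++ [s.2], [line])
          else (s.1, s.2 ++ [line]))
        (accB, cur)) := by
  intro ls
  induction ls with
  | nil =>
    intro acc cur flag accB hflag hacc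
    simp only [List.foldl_nil, pvFinA, pvFinB]
    subst hflag
    exact pv_flush_eq terms acc cur accB hacc
  | cons l rest ih =>
    intro acc cur flag accB hflag hacc
    simp only [List.foldl_cons]
    by_cases hh : PySem.Str.startswith l "#" = true
    · simp only [hh, if_true]
      refine ih _ _ _ _ (by simp [pvAnyRel, pvRel]) ?_
      subst hflag
      exact pv_flush_eq terms acc cur accB hacc
    · simp only [hh, Bool.false_eq_true, if_false]
      refine ih _ _ _ _ ?_ hacc
      subst hflag
      simp [pvAnyRel, pvRel, List.any_append]

-- lifting the loop equality through the common 100-line fallback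
theorem pv_post (x y z : List String) (h : x = y) :
    (if x.isEmpty then z else x) = (if y.isEmpty then z else y) := by rw [h]

-- ===== VERDICT (by name: the statement is the Claim_ definition above) =====
theorem extract_relevant_sections_py_spec : Claim_equal_extract_relevant_sections_py := by
  intro content query _
  unfold Spec_extract_relevant_sections_py extract_relevant_sections_py extract_relevant_sections_py_alt
  exact pv_post _ _ _
    (pv_loop_eq (PySem.Str.split₀ (PySem.Str.lower query))
      ((PySem.Str.split? content "\n").getD []) [] [] false []
      (by simp [pvAnyRel]) (by simp))
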